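-- pv_equiv track=rewrite | github.com/bipentihexium/wys_arg_tools | wys_lib.py | intelligencecheck_decrypt
-- ===== SOURCE A (Python) =====
-- def intelligencecheck_decrypt(data:str, key:list) -> str:
-- 	"""decrypts data encoded with the L5 algorithm"""
-- 	index = 0
-- 	keyindex = 0
-- 	result = ""
-- 	while data:
-- 		index = ((index + key[keyindex]) % len(data) + len(data)) % len(data)
-- 		keyindex = (keyindex + 1) % len(key)
-- 		result += data[index]
-- 		data = data[:index] + data[index+1:]
-- 	return result
-- ===== SOURCE B (Python) =====
-- def intelligencecheck_decrypt(data: str, key: list) -> str: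
-- 	"""decrypts data encoded with the L5 algorithm (order-statistics tree, O(n log n))"""
-- 	n = len(data)
-- 	if n == 0:
-- 		return ""
-- 	def build(lo, hi):
-- 		# node = [count, char_or_None, left, right]
-- 		if hi - lo == 1:
-- 			return [1, data[lo], None, None]
-- 		mid = (lo + hi) // 2
-- 		l = build(lo, mid)
-- 		r = build(mid, hi)
-- 		return [l[0] + r[0], None, l, r]
-- 	root = build(0, n)
-- 	out = []
-- 	index = 0
-- 	keyindex = 0
-- 	for m in range(n, 0, -1):
-- 		index = (index + key[keyindex]) % m
-- 		keyindex = (keyindex + 1) % len(key)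
-- 		# select and remove the index-th remaining character
-- 		node = root
-- 		r = index
-- 		while node[2] is not None:
-- 			node[0] -= 1
-- 			if r < node[2][0]:
-- 				node = node[2]
-- 			else:
-- 				r -= node[2][0]
-- 				node = node[3]
-- 		node[0] = 0
-- 		out.append(node[1])
-- 	return "".join(out)
-- ===== Notes on version B (the rewrite author's own statement) =====
-- stated objective: faster
-- what changed: A re-slices the string each step to find and delete the rank-th remaining character (O(n) per step); B builds a balanced count-annotated tree once and selects/deletes the rank-th remaining character by descending on cached subtree counts, O(log n) per step.
import Mathlib
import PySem

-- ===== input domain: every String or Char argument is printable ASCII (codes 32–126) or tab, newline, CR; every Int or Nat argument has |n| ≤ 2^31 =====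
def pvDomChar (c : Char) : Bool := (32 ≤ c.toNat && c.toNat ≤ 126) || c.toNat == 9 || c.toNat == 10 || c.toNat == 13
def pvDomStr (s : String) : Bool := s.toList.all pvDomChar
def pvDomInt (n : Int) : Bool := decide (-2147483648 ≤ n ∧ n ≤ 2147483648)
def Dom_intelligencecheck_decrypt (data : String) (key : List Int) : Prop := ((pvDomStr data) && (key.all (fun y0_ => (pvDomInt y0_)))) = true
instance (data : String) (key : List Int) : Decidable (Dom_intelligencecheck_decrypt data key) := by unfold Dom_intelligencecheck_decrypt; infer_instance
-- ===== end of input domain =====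

-- B replaces A's select-and-slice loop by a balanced count-tree (order-statistics) select/delete.


-- ===== PORT A =====
-- A's while-loop: each iteration picks data[index] and removes it by slicing.
-- Fuel = initial length (the loop removes exactly one character per iteration).
def pvLoopA (key : List Int) : Nat → List Char → Int → Int → List Char → List Char
  | 0, _, _, _, result => result
  | fuel + 1, data, index, keyindex, result =>
    if data = [] then result
    else
      match PySem.List.pyGet? key keyindex with
      | none => result   -- key[keyindex] raises IndexError (excluded by Pre_)
      | some k =>
        let n : Int := (data.length : Int)
        let index' := PySem.Int.mod (PySem.Int.mod (index + k) n + n) n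
        let keyindex' := PySem.Int.mod (keyindex + 1) (key.length : Int)
        match PySem.List.pyGet? data index' with
        | none => result  -- unreachable: index' ∈ [0, n)
        | some c =>
          pvLoopA key fuel
            (PySem.List.slice data none (some index') ++
             PySem.List.slice data (some (index' + 1)) none)
            index' keyindex' (result ++ [c])

def intelligencecheck_decrypt (data : String) (key : List Int) : String :=
  String.ofList (pvLoopA key data.toList.length data.toList 0 0 [])

-- ===== PORT B =====
-- Balanced tree over the characters; every node caches the count of not-yet-removed leaves below it.
inductive PVT where
  | leaf : Nat → Char → PVT          -- count (1 = alive, 0 = removed), character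
  | node : Nat → PVT → PVT → PVT     -- cached count, left, right
deriving DecidableEq, Repr

def pvCnt : PVT → Nat
  | .leaf k _ => k
  | .node k _ _ => k

-- Source B's build(lo, hi) over data[lo:hi]; the [] case is unreachable (build is only called on nonempty ranges)
def pvBuild : List Char → PVT
  | [] => .leaf 0 ' '
  | [c] => .leaf 1 c
  | c1 :: c2 :: rest =>
    let cs := c1 :: c2 :: rest
    let h := cs.length / 2
    .node cs.length (pvBuild (cs.take h)) (pvBuild (cs.drop h))
  termination_by cs => cs.length
  decreasing_by
    · simp [List.length_take]; omega
    · simp [List.length_drop]; omega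

-- Source B's descend-and-delete: decrement counts along the path, return the selected char
def pvPick : PVT → Nat → Char × PVT
  | .leaf _ c, _ => (c, .leaf 0 c)
  | .node k l r, i =>
    if i < pvCnt l then
      let p := pvPick l i
      (p.1, .node (k - 1) p.2 r)
    else
      let p := pvPick r (i - pvCnt l)
      (p.1, .node (k - 1) l p.2)

-- Source B's "for m in range(n, 0, -1)" loop; m is the current remaining count
def pvLoopB (key : List Int) : Nat → PVT → Int → Int → List Char → List Char
  | 0, _, _, _, out => out
  | m + 1, t, index, keyindex, out =>
    match PySem.List.pyGet? key keyindex with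
    | none => out   -- key[keyindex] raises IndexError (excluded by Pre_)
    | some k =>
      let index' := PySem.Int.mod (index + k) ((m + 1 : Nat) : Int)
      let keyindex' := PySem.Int.mod (keyindex + 1) (key.length : Int)
      let p := pvPick t index'.toNat
      pvLoopB key m p.2 index' keyindex' (out ++ [p.1])

def intelligencecheck_decrypt_alt (data : String) (key : List Int) : String :=
  let cs := data.toList
  if cs.length = 0 then ""
  else String.ofList (pvLoopB key cs.length (pvBuild cs) 0 0 [])

-- ===== PRECONDITION & SPEC =====
-- A raises IndexError (key[0]) when the data is nonempty and the key is empty; excluded.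
def Pre_intelligencecheck_decrypt (data : String) (key : List Int) : Prop :=
  data.toList = [] ∨ key ≠ []
instance (data : String) (key : List Int) : Decidable (Pre_intelligencecheck_decrypt data key) := by
  unfold Pre_intelligencecheck_decrypt; infer_instance

def pvWitness_intelligencecheck_decrypt : String × List Int := ("abcde", [3, -1])

def Spec_intelligencecheck_decrypt (data : String) (key : List Int) (out : String) : Prop := out = intelligencecheck_decrypt_alt data key
instance (data : String) (key : List Int) (out : String) : Decidable (Spec_intelligencecheck_decrypt data key out) := by unfold Spec_intelligencecheck_decrypt; infer_instance

-- ===== CLAIM (what is proved, stated in full; the proofs are below) =====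
def Claim_equal_intelligencecheck_decrypt : Prop := ∀ (data : String) (key : List Int), Dom_intelligencecheck_decrypt data key → Pre_intelligencecheck_decrypt data key → Spec_intelligencecheck_decrypt data key (intelligencecheck_decrypt data key)

-- ===== LEMMAS AND PROOFS =====

-- well-formedness: every cached count equals the number of alive leaves below it
def pvWF : PVT → Prop
  | .leaf k _ => k ≤ 1
  | .node k l r => k = pvCnt l + pvCnt r ∧ pvWF l ∧ pvWF r

-- the list of not-yet-removed characters, in order
def pvAlive : PVT → List Char
  | .leaf k c => if k = 0 then [] else [c]
  | .node _ l r => pvAlive l ++ pvAlive r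

theorem pvWF_length (t : PVT) (h : pvWF t) : (pvAlive t).length = pvCnt t := by
  induction t with
  | leaf k c => simp only [pvWF, pvCnt] at *; simp [pvAlive]; split <;> simp <;> omega
  | node k l r ihl ihr =>
    obtain ⟨hk, hl, hr⟩ := h
    simp [pvAlive, pvCnt, hk, ihl hl, ihr hr]

theorem pvPick_spec (t : PVT) (i : Nat) (h : pvWF t) (hi : i < pvCnt t) :
    (pvPick t i).1 = (pvAlive t).getD i ' ' ∧
    pvAlive (pvPick t i).2 = (pvAlive t).eraseIdx i ∧
    pvWF (pvPick t i).2 ∧ pvCnt (pvPick t i).2 = pvCnt t - 1 := by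
  induction t generalizing i with
  | leaf k c =>
    simp only [pvWF] at h
    simp only [pvCnt] at hi
    have hk : k = 1 := by omega
    have h0 : i = 0 := by omega
    subst hk h0
    simp [pvPick, pvAlive, pvWF, pvCnt]
  | node k l r ihl ihr =>
    obtain ⟨hk, hl, hr⟩ := h
    simp only [pvCnt] at hi
    have hLl := pvWF_length l hl
    have hLr := pvWF_length r hr
    by_cases hlt : i < pvCnt l
    · obtain ⟨h1, h2, h3, h4⟩ := ihl i hl hlt
      simp only [pvPick, hlt, if_pos]
      refine ⟨?_, ?_, ⟨by omega, h3, hr⟩, rfl⟩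
      · rw [pvAlive, List.getD_append _ _ _ _ (by omega)]
        exact h1
      · show pvAlive (.node (k-1) (pvPick l i).2 r) = _
        rw [pvAlive, pvAlive, h2, List.eraseIdx_append_of_lt_length (by omega)]
    · have hi' : i - pvCnt l < pvCnt r := by omega
      obtain ⟨h1, h2, h3, h4⟩ := ihr (i - pvCnt l) hr hi'
      simp only [pvPick, hlt, if_neg, not_false_iff]
      refine ⟨?_, ?_, ⟨by omega, hl, h3⟩, rfl⟩
      · rw [pvAlive, List.getD_append_right _ _ _ _ (by omega), hLl]
        exact h1
      · show pvAlive (.node (k-1) l (pvPick r (i - pvCnt l)).2) = _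
        rw [pvAlive, pvAlive, h2, List.eraseIdx_append_of_length_le (by omega), hLl]

theorem pvBuild_spec (cs : List Char) :
    cs ≠ [] → pvWF (pvBuild cs) ∧ pvAlive (pvBuild cs) = cs ∧ pvCnt (pvBuild cs) = cs.length := by
  induction cs using pvBuild.induct with
  | case1 => intro h; simp at h
  | case2 c => intro _; simp [pvBuild, pvWF, pvAlive, pvCnt]
  | case3 c1 c2 rest csv hv ihl ihr =>
    intro _
    have htake : List.take ((rest.length + 1 + 1) / 2) (c1 :: c2 :: rest) ≠ [] := by
      simp [List.take_eq_nil_iff]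
    have hdrop : List.drop ((rest.length + 1 + 1) / 2) (c1 :: c2 :: rest) ≠ [] := by
      simp [List.drop_eq_nil_iff]; omega
    obtain ⟨w1, a1, cn1⟩ := ihl htake
    obtain ⟨w2, a2, cn2⟩ := ihr hdrop
    -- restate the IH conclusions with the let-definitions unfolded (definitional equality)
    have a1' : pvAlive (pvBuild (List.take ((rest.length + 1 + 1) / 2) (c1 :: c2 :: rest))) = List.take ((rest.length + 1 + 1) / 2) (c1 :: c2 :: rest) := a1
    have a2' : pvAlive (pvBuild (List.drop ((rest.length + 1 + 1) / 2) (c1 :: c2 :: rest))) = List.drop ((rest.length + 1 + 1) / 2) (c1 :: c2 :: rest) := a2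
    have cn1' : pvCnt (pvBuild (List.take ((rest.length + 1 + 1) / 2) (c1 :: c2 :: rest))) = (List.take ((rest.length + 1 + 1) / 2) (c1 :: c2 :: rest)).length := cn1
    have cn2' : pvCnt (pvBuild (List.drop ((rest.length + 1 + 1) / 2) (c1 :: c2 :: rest))) = (List.drop ((rest.length + 1 + 1) / 2) (c1 :: c2 :: rest)).length := cn2
    rw [pvBuild]
    simp only [List.length_cons]
    refine ⟨⟨?_, w1, w2⟩, ?_, ?_⟩
    · rw [cn1', cn2']
      simp [List.length_take, List.length_drop]
      omega
    · show pvAlive (pvBuild _) ++ pvAlive (pvBuild _) = _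
      rw [a1', a2', List.take_append_drop]
    · rfl

-- ((x % n) + n) % n = x % n for 0 < n  (A's extra "+ n) % n" is redundant under Python's mod)
theorem pvDoubleMod (x n : Int) (hn : 0 < n) :
    PySem.Int.mod (PySem.Int.mod x n + n) n = PySem.Int.mod x n := by
  rw [PySem.Int.mod_eq_emod_of_pos hn, PySem.Int.mod_eq_emod_of_pos hn,
      Int.add_emod_right, Int.emod_emod_of_dvd x dvd_rfl]

theorem pvLoop_eq (key : List Int) (hkey : key ≠ []) :
    ∀ (m : Nat) (cs : List Char) (t : PVT) (index keyindex : Int) (acc : List Char),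
      cs.length = m → pvWF t → pvAlive t = cs →
      0 ≤ keyindex → keyindex < (key.length : Int) →
      pvLoopA key m cs index keyindex acc = pvLoopB key m t index keyindex acc := by
  intro m
  induction m with
  | zero => intro cs t index keyindex acc _ _ _ _ _; rfl
  | succ m ih =>
    intro cs t index keyindex acc hm hwf hal hk0 hk1
    have hcs : cs ≠ [] := by intro h; subst h; simp at hm
    -- the key lookup succeeds
    have hkeq : keyindex = ((keyindex.toNat : Nat) : Int) := by omega
    have hklt : keyindex.toNat < key.length := by omega
    have hget : PySem.List.pyGet? key keyindex = key[keyindex.toNat]? := by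
      conv_lhs => rw [hkeq]
      exact PySem.List.pyGet?_natCast key keyindex.toNat
    have hnpos : (0 : Int) < ((m + 1 : Nat) : Int) := by positivity
    have hlenI : ((cs.length : Nat) : Int) = ((m + 1 : Nat) : Int) := by rw [hm]
    set k := key[keyindex.toNat] with hkdef
    -- both sides compute the same rank
    set idx := PySem.Int.mod (index + k) ((m + 1 : Nat) : Int) with hidx
    have hidx0 : 0 ≤ idx := PySem.Int.mod_nonneg _ hnpos
    have hidx1 : idx < ((m + 1 : Nat) : Int) := PySem.Int.mod_lt _ hnpos
    have hidxN : idx.toNat < cs.length := by omega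
    have hidxcast : idx = ((idx.toNat : Nat) : Int) := by omega
    -- A's data lookup succeeds and removal is eraseIdx
    have hgetd : PySem.List.pyGet? cs idx = cs[idx.toNat]? := by
      conv_lhs => rw [hidxcast]
      exact PySem.List.pyGet?_natCast cs idx.toNat
    have hslice : PySem.List.slice cs none (some idx) ++
        PySem.List.slice cs (some (idx + 1)) none = cs.eraseIdx idx.toNat := by
      rw [PySem.List.slice_to cs hidx0, PySem.List.slice_from cs (by omega : (0:Int) ≤ idx + 1)]
      have : (idx + 1).toNat = idx.toNat + 1 := by omega
      rw [this, List.eraseIdx_eq_take_drop_succ]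
    -- B's pick returns the same character and the erased list
    have hcnt : pvCnt t = cs.length := by rw [← pvWF_length t hwf, hal]
    obtain ⟨p1, p2, p3, p4⟩ := pvPick_spec t idx.toNat hwf (by omega)
    have hchar : (pvPick t idx.toNat).1 = cs[idx.toNat] := by
      rw [p1, hal, List.getD_eq_getElem _ _ hidxN]
    -- new keyindex stays in range
    have hkl : (0 : Int) < (key.length : Int) := by
      have : key.length ≠ 0 := fun h => hkey (List.eq_nil_of_length_eq_zero h)
      omega
    have hk0' : 0 ≤ PySem.Int.mod (keyindex + 1) (key.length : Int) :=
      PySem.Int.mod_nonneg _ hkl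
    have hk1' : PySem.Int.mod (keyindex + 1) (key.length : Int) < (key.length : Int) :=
      PySem.Int.mod_lt _ hkl
    -- unfold one step of each loop
    rw [pvLoopA, pvLoopB]
    simp only [if_neg hcs, hget, List.getElem?_eq_getElem hklt]
    rw [show ((cs.length : Nat) : Int) = ((m + 1 : Nat) : Int) from hlenI]
    rw [pvDoubleMod _ _ hnpos]
    simp only [← hkdef, ← hidx, hgetd, List.getElem?_eq_getElem hidxN, hslice, hchar]
    exact ih (cs.eraseIdx idx.toNat) (pvPick t idx.toNat).2 idx _ (acc ++ [cs[idx.toNat]])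
      (by rw [List.length_eraseIdx]; simp only [if_pos hidxN]; omega) p3 (by rw [p2, hal]) hk0' hk1'

-- ===== VERDICT (by name: the statement is the Claim_ definition above) =====
theorem intelligencecheck_decrypt_spec : Claim_equal_intelligencecheck_decrypt := by
  intro data key _ hpre
  unfold Spec_intelligencecheck_decrypt intelligencecheck_decrypt intelligencecheck_decrypt_alt
  by_cases hempty : data.toList = []
  · simp [hempty, pvLoopA]
  · have hkey : key ≠ [] := by
      rcases hpre with h | h
      · exact absurd h hempty
      · exact h
    obtain ⟨w, a, c⟩ := pvBuild_spec data.toList hempty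
    have hlen : data.toList.length ≠ 0 := by simpa [List.length_eq_zero_iff] using hempty
    rw [if_neg hlen]
    rw [pvLoop_eq key hkey data.toList.length data.toList (pvBuild data.toList) 0 0 []
      rfl w a (by omega) (by have : key.length ≠ 0 := fun h => hkey (List.eq_nil_of_length_eq_zero h); omega)]
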